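-- pv_equiv track=rewrite | github.com/nodejs/node | deps/v8/third_party/test262-harness/src/_monkeyYaml.py | myMultiline
-- ===== SOURCE A (Python) =====
-- def myMultiline(lines, preserveNewlines=False):
--     # assume no explcit indentor (otherwise have to parse value)
--     value = ""
--     indent = myLeadingSpaces(lines[0])
--     wasEmpty = None
--
--     while lines:
--         line = lines.pop(0)
--         isEmpty = myIsAllSpaces(line)
--
--         if isEmpty:
--             if preserveNewlines:
--                 value += "\n"
--         elif myLeadingSpaces(line) < indent:
--             lines.insert(0, line)
--             break;
--         else:
--             if preserveNewlines:
--                 if wasEmpty != None: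
--                     value += "\n"
--             else:
--                 if wasEmpty == False:
--                     value += " "
--                 elif wasEmpty == True:
--                     value += "\n"
--             value += line[(indent):]
--
--         wasEmpty = isEmpty
--
--     return (lines, value)
--
-- def myIsAllSpaces(line):
--     return len(line.strip()) == 0
--
-- def myLeadingSpaces(line):
--     return len(line) - len(line.lstrip(' '))
-- ===== SOURCE B (Python) =====
-- def myMultiline(lines, preserveNewlines=False):
--     # Boundary scan + stateless index-based join; mutates lines in place via del slice.
--     indent = myLeadingSpaces(lines[0])
--     n = 0
--     while n < len(lines):
--         line = lines[n]
--         if not myIsAllSpaces(line) and myLeadingSpaces(line) < indent: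
--             break
--         n += 1
--
--     def piece(i):
--         line = lines[i]
--         if myIsAllSpaces(line):
--             return "\n" if preserveNewlines else ""
--         if i == 0:
--             return line[indent:]
--         if preserveNewlines:
--             return "\n" + line[indent:]
--         return ("\n" if myIsAllSpaces(lines[i - 1]) else " ") + line[indent:]
--
--     value = "".join(piece(i) for i in range(n))
--     del lines[:n]
--     return (lines, value)
--
-- def myIsAllSpaces(line):
--     return len(line.strip()) == 0
--
-- def myLeadingSpaces(line):
--     return len(line) - len(line.lstrip(' '))
-- ===== Notes on version B (the rewrite author's own statement) =====
-- stated objective: faster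
-- what changed: Replaces A's destructive pop(0)/insert(0) loop that threads a wasEmpty state through the string accumulation by a two-phase plan: an index scan finds the block length n, then the value is a join of stateless per-index pieces (the separator before line i is derived from i and the emptiness of line i-1, eliminating the wasEmpty state), and the list is cut with one del slice; A's pop(0)/insert(0) shift the whole list each iteration.
-- outside the precondition, e.g. on myMultiline([], False): A raises IndexError, B raises IndexError
import Mathlib
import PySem

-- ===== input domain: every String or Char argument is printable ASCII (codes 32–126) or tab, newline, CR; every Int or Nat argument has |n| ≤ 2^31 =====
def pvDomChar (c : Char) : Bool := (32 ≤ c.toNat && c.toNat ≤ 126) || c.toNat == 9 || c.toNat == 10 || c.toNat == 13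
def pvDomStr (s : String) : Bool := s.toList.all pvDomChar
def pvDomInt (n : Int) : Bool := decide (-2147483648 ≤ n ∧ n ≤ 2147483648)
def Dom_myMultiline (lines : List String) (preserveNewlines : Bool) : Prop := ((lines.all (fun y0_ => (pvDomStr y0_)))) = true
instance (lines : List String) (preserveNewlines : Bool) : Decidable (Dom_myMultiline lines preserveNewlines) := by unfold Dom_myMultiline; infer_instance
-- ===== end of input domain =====

-- B replaces A's pop(0)/insert(0) loop (O(n) per step) threading a wasEmpty state by an index
-- boundary scan plus a stateless per-index piece/join (the separator before line i depends only
-- on i and line i-1) and one del slice — measured faster in a timing run.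
-- Both Pythons mutate `lines` in place identically; the theorems are about the return value.

-- ===== PORT A =====
def myIsAllSpaces (line : String) : Bool :=
  PySem.Chars.len (PySem.Chars.strip line.toList) == 0

-- lstrip(' ') ported by hand as dropWhile (· == ' '): exact, since Python's lstrip(' ')
-- removes exactly the maximal run of leading ' ' characters.
def myLeadingSpaces (line : String) : Int :=
  PySem.Chars.len line.toList - PySem.Chars.len (line.toList.dropWhile (· == ' '))

def myMultilineLoop (indent : Int) (preserveNewlines : Bool) :
    List String → String → Option Bool → List String × String
  | [], value, _ => ([], value)
  | line :: rest, value, wasEmpty =>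
    let isEmpty := myIsAllSpaces line
    if isEmpty then
      myMultilineLoop indent preserveNewlines rest
        (if preserveNewlines then value ++ "\n" else value) (some true)
    else if myLeadingSpaces line < indent then
      (line :: rest, value)
    else
      let value1 :=
        if preserveNewlines then (if wasEmpty ≠ none then value ++ "\n" else value)
        else if wasEmpty = some false then value ++ " "
        else if wasEmpty = some true then value ++ "\n"
        else value
      myMultilineLoop indent preserveNewlines rest
        (value1 ++ PySem.Str.slice line (some indent) none) (some false)

def myMultiline (lines : List String) (preserveNewlines : Bool) : List String × String :=
  match lines with
  | [] => ([], "")  -- Python raises IndexError on lines[0] here; excluded by Pre_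
  | l0 :: _ => myMultilineLoop (myLeadingSpaces l0) preserveNewlines lines "" none

-- ===== PORT B =====
-- boundary scan of Source B's while-loop: length of the prefix belonging to the block
def myBlockLen (indent : Int) : List String → Nat
  | [] => 0
  | line :: rest =>
    if !myIsAllSpaces line && myLeadingSpaces line < indent then 0
    else myBlockLen indent rest + 1

def myPiece (lines : List String) (indent : Int) (preserveNewlines : Bool) (i : Nat) : String :=
  let line := lines.getD i ""
  if myIsAllSpaces line then (if preserveNewlines then "\n" else "")
  else if i = 0 then PySem.Str.slice line (some indent) none
  else if preserveNewlines then "\n" ++ PySem.Str.slice line (some indent) none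
  else (if myIsAllSpaces (lines.getD (i - 1) "") then "\n" else " ") ++
    PySem.Str.slice line (some indent) none

def myMultiline_alt (lines : List String) (preserveNewlines : Bool) : List String × String :=
  match lines with
  | [] => ([], "")
  | l0 :: _ =>
    let indent := myLeadingSpaces l0
    let n := myBlockLen indent lines
    (lines.drop n,
     PySem.Str.join "" ((List.range n).map (myPiece lines indent preserveNewlines)))

-- ===== PRECONDITION & SPEC =====
-- Pre_ excludes only the empty list, on which A raises IndexError at lines[0].
def Pre_myMultiline (lines : List String) (preserveNewlines : Bool) : Prop := lines ≠ []
instance (lines : List String) (preserveNewlines : Bool) : Decidable (Pre_myMultiline lines preserveNewlines) := by unfold Pre_myMultiline; infer_instance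
def pvWitness_myMultiline : List String × Bool := (["  a", "   b", "c"], false)

def Spec_myMultiline (lines : List String) (preserveNewlines : Bool) (out : List String × String) : Prop := out = myMultiline_alt lines preserveNewlines
instance (lines : List String) (preserveNewlines : Bool) (out : List String × String) : Decidable (Spec_myMultiline lines preserveNewlines out) := by unfold Spec_myMultiline; infer_instance

-- ===== CLAIM (what is proved, stated in full; the proofs are below) =====
def Claim_equal_myMultiline : Prop := ∀ (lines : List String) (preserveNewlines : Bool), Dom_myMultiline lines preserveNewlines → Pre_myMultiline lines preserveNewlines → Spec_myMultiline lines preserveNewlines (myMultiline lines preserveNewlines)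

-- ===== LEMMAS AND PROOFS =====

-- the separator A's loop emits before a non-empty block line, as a function of wasEmpty
def pvSep (preserveNewlines : Bool) (w : Option Bool) : List Char :=
  if preserveNewlines then (if w ≠ none then ['\n'] else [])
  else match w with
    | some false => [' ']
    | some true => ['\n']
    | none => []

-- the character list A's loop appends to `value`, by recursion over the lines
def pvVal (indent : Int) (preserveNewlines : Bool) : List String → Option Bool → List Char
  | [], _ => []
  | line :: rest, w =>
    if myIsAllSpaces line then
      (if preserveNewlines then ['\n'] else []) ++ pvVal indent preserveNewlines rest (some true)
    else if myLeadingSpaces line < indent then []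
    else pvSep preserveNewlines w ++ (PySem.Str.slice line (some indent) none).toList ++
      pvVal indent preserveNewlines rest (some false)

-- myPiece generalized: the incoming wasEmpty state `w` replaces the i = 0 case
def pvPieceW (indent : Int) (preserveNewlines : Bool) (w : Option Bool)
    (l : List String) (i : Nat) : List Char :=
  let line := l.getD i ""
  if myIsAllSpaces line then (if preserveNewlines then ['\n'] else [])
  else pvSep preserveNewlines (if i = 0 then w else some (myIsAllSpaces (l.getD (i - 1) ""))) ++
    (PySem.Str.slice line (some indent) none).toList

theorem pvPieceW_succ (indent : Int) (pn : Bool) (w : Option Bool) (line : String)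
    (rest : List String) (i : Nat) :
    pvPieceW indent pn w (line :: rest) (i + 1) =
      pvPieceW indent pn (some (myIsAllSpaces line)) rest i := by
  cases i <;> simp [pvPieceW]

theorem myPiece_toList (l : List String) (indent : Int) (pn : Bool) (i : Nat) :
    (myPiece l indent pn i).toList = pvPieceW indent pn none l i := by
  unfold myPiece pvPieceW
  cases he : myIsAllSpaces (l[i]?.getD "") with
  | true => cases pn <;> simp [he]
  | false =>
    cases i with
    | zero => cases pn <;> simp [he, pvSep]
    | succ j =>
      cases pn with
      | false => cases he2 : myIsAllSpaces (l[j]?.getD "") <;> simp [he, he2, pvSep]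
      | true => simp [he, pvSep]

theorem loop_fst (indent : Int) (pn : Bool) :
    ∀ (l : List String) (value : String) (w : Option Bool),
      (myMultilineLoop indent pn l value w).1 = l.drop (myBlockLen indent l) := by
  intro l
  induction l with
  | nil => intro value w; simp [myMultilineLoop, myBlockLen]
  | cons line rest ih =>
    intro value w
    by_cases he : myIsAllSpaces line = true
    · simp [myMultilineLoop, myBlockLen, he, ih]
    · simp only [Bool.not_eq_true] at he
      by_cases hlt : myLeadingSpaces line < indent
      · simp [myMultilineLoop, myBlockLen, he, hlt]
      · simp [myMultilineLoop, myBlockLen, he, hlt, ih]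

theorem loop_snd (indent : Int) (pn : Bool) :
    ∀ (l : List String) (value : String) (w : Option Bool),
      (myMultilineLoop indent pn l value w).2.toList = value.toList ++ pvVal indent pn l w := by
  intro l
  induction l with
  | nil => intro value w; simp [myMultilineLoop, pvVal]
  | cons line rest ih =>
    intro value w
    by_cases he : myIsAllSpaces line = true
    · cases pn <;> simp [myMultilineLoop, pvVal, he, ih]
    · simp only [Bool.not_eq_true] at he
      by_cases hlt : myLeadingSpaces line < indent
      · simp [myMultilineLoop, pvVal, he, hlt]
      · cases w with
        | none => cases pn <;> simp [myMultilineLoop, pvVal, pvSep, he, hlt, ih]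
        | some b => cases b <;> cases pn <;> simp [myMultilineLoop, pvVal, pvSep, he, hlt, ih]

theorem flatten_pieces (indent : Int) (pn : Bool) :
    ∀ (l : List String) (w : Option Bool),
      ((List.range (myBlockLen indent l)).map (pvPieceW indent pn w l)).flatten =
        pvVal indent pn l w := by
  intro l
  induction l with
  | nil => intro w; simp [myBlockLen, pvVal]
  | cons line rest ih =>
    intro w
    by_cases he : myIsAllSpaces line = true
    · have hn : myBlockLen indent (line :: rest) = myBlockLen indent rest + 1 := by
        simp [myBlockLen, he]
      rw [hn, List.range_succ_eq_map]
      simp only [List.map_cons, List.map_map, List.flatten_cons]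
      have : ∀ i, (pvPieceW indent pn w (line :: rest) ∘ Nat.succ) i =
          pvPieceW indent pn (some (myIsAllSpaces line)) rest i := by
        intro i; exact pvPieceW_succ indent pn w line rest i
      rw [List.map_congr_left (fun i _ => this i), ih]
      simp [pvVal, pvPieceW, he]
    · simp only [Bool.not_eq_true] at he
      by_cases hlt : myLeadingSpaces line < indent
      · simp [myBlockLen, pvVal, he, hlt]
      · have hn : myBlockLen indent (line :: rest) = myBlockLen indent rest + 1 := by
          simp [myBlockLen, he, hlt]
        rw [hn, List.range_succ_eq_map]
        simp only [List.map_cons, List.map_map, List.flatten_cons]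
        have : ∀ i, (pvPieceW indent pn w (line :: rest) ∘ Nat.succ) i =
            pvPieceW indent pn (some (myIsAllSpaces line)) rest i := by
          intro i; exact pvPieceW_succ indent pn w line rest i
        rw [List.map_congr_left (fun i _ => this i), ih]
        simp [pvVal, pvPieceW, he, hlt]

theorem intercalate_nil_flatten (l : List (List Char)) : [].intercalate l = l.flatten := by
  simp [List.intercalate]
  induction l with
  | nil => simp
  | cons a t ih => cases t <;> simp_all

theorem join_empty_toList (parts : List String) :
    (PySem.Str.join "" parts).toList = (parts.map String.toList).flatten := by
  rw [PySem.Str.toList_join]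
  simp [PySem.Chars.join, intercalate_nil_flatten]

-- ===== VERDICT (by name: the statement is the Claim_ definition above) =====
theorem myMultiline_spec : Claim_equal_myMultiline := by
  intro lines pn _ hpre
  unfold Spec_myMultiline
  match lines with
  | [] => exact absurd rfl hpre
  | l0 :: rest =>
    unfold myMultiline myMultiline_alt
    apply Prod.ext
    · exact loop_fst _ pn _ "" none
    · apply String.toList_inj.mp
      rw [loop_snd _ pn _ "" none, join_empty_toList]
      have : (((List.range (myBlockLen (myLeadingSpaces l0) (l0 :: rest))).map
          (myPiece (l0 :: rest) (myLeadingSpaces l0) pn)).map String.toList) =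
          (List.range (myBlockLen (myLeadingSpaces l0) (l0 :: rest))).map
          (pvPieceW (myLeadingSpaces l0) pn none (l0 :: rest)) := by
        rw [List.map_map]
        exact List.map_congr_left (fun i _ => myPiece_toList _ _ _ i)
      rw [this, flatten_pieces]
      simp
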